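-- pv_equiv track=rewrite | github.com/edt-yxz-zzd/python3_src | nn_ns/algo/sep_str.py | sep_str_mx_uv_def
-- ===== SOURCE A (Python) =====
-- def fmt_mx_uv(mx, u, v1, v2):
--     #mx = (tuple(r) for r in mx)
--     #u = (tuple(r) for r in u)
--     mx = tuple(map(tuple, mx))
--     u = tuple(map(tuple, u))
--     v1,v2 = map(tuple, (v1,v2))
--     return (mx, u, v1, v2)
--
-- def sep_str_mx_uv_def(s):# without W!!!!
--     'u*([[W]+[0]*(L-1)]*L+T)^n*v1 ( or v2 if not the last chunk)'
--     L = len(s)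
--
--     u = [0]*L
--     u[0] = 1
--     u = [u] # row vector
--
--     v1 = [1]*L
--     v2 = [1]*L
--     for i in range(L):
--         s_ = s[:i] + s[:-1]
--         for j in range(i):
--             if s == s_[j:j+L]:
--                 v2[i] = 0
--                 break
--     mx = []
--     for i in range(L):
--         r = [0]*L
--         r[0] = -1
--         used = [s[i]]
--         for j in range(i,0,-1):
--             if s[:j-1] == s[i-(j-1):i] and s[j-1] not in used:
--                 used.append(s[j-1])
--                 r[j] = 1
--                 r[0] -= 1
--         mx.append(r)
--     for i in range(L-1):
--         mx[i][i+1] = 1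
--
--     return fmt_mx_uv(mx, u, v1, v2)
-- ===== SOURCE B (Python) =====
-- def sep_str_mx_uv_def(s):
--     'u*([[W]+[0]*(L-1)]*L+T)^n*v1 ( or v2 if not the last chunk)'
--     L = len(s)
--     # z[j] = length of the longest common prefix of s and s[j:], computed once;
--     # every substring-vs-prefix equality below becomes an O(1) lookup.
--     z = []
--     for j in range(L):
--         k = 0
--         while j + k < L and s[k] == s[j + k]:
--             k += 1
--         z.append(k)
--     u = (tuple([1] + [0] * (L - 1)),)
--     v1 = (1,) * L
--     # d + z[d] == L  <=>  s[d:] == s[:L-d]; s occurs at shift i-d within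
--     # s[:i]+s[:-1] iff additionally s[:d] == s[i-d:i], i.e. z[i-d] >= d.
--     ds = [d for d in range(1, L) if d + z[d] == L]
--     v2 = tuple(0 if any(d <= i and z[i - d] >= d for d in ds) else 1
--                for i in range(L))
--     mx = []
--     for i in range(L):
--         marks = []
--         seen = [s[i]]
--         for k in range(i - 1, -1, -1):
--             if z[i - k] >= k and s[k] not in seen:
--                 seen.append(s[k])
--                 marks.append(k)
--         r = [0] * L
--         r[0] = -1 - len(marks)
--         for k in marks:
--             r[k + 1] = 1
--         if i + 1 < L:
--             r[i + 1] = 1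
--         mx.append(tuple(r))
--     return (tuple(mx), u, v1, v2)
-- ===== Notes on version B (the rewrite author's own statement) =====
-- stated objective: faster
-- what changed: B precomputes the Z-array (longest common prefix of s and each suffix) once, turning every O(L) prefix-vs-substring slice comparison of A (in both the v2 loop and the matrix rows) into an O(1) lookup, and builds each row from a collected mark list instead of in-place decrements.
import Mathlib
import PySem

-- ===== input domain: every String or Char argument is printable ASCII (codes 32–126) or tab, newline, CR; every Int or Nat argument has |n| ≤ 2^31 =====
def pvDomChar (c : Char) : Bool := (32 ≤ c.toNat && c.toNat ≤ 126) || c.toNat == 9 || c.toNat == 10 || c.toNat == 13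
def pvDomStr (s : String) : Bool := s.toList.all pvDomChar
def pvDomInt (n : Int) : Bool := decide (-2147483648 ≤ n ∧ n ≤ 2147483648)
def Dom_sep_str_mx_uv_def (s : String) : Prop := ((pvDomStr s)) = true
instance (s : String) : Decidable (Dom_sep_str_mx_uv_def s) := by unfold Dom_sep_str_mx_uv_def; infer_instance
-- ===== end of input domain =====

-- B replaces every O(L) substring-vs-prefix comparison of A by an O(1) lookup in a
-- precomputed longest-common-prefix (Z) array: O(L^2) instead of O(L^3).

-- ===== PORT A =====
-- A's inner 'for j in range(i,0,-1)' loop over the row r (here k = j-1, so the counter t+1 means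
-- Python's j = t+1): s[:k] = l.take k, s[i-k:i] = (l.take i).drop (i-k) (0 ≤ k ≤ i ≤ len, exact),
-- s[j-1] = l.getD k ' ' (index in range, exact), 'c not in used' = c ∉ used.
def pvRowLoopA (l : List Char) (i : Nat) : Nat → List Char → List Int → List Int
  | 0, _, r => r
  | t+1, used, r =>
    let k := t
    let c := l.getD k ' '
    if l.take k = (l.take i).drop (i - k) ∧ c ∉ used then
      let r1 := r.set (k+1) 1               -- r[j] = 1
      let r2 := r1.set 0 (r1.getD 0 0 - 1)  -- r[0] -= 1
      pvRowLoopA l i t (used ++ [c]) r2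
    else
      pvRowLoopA l i t used r

def sep_str_mx_uv_def (s : String) : List (List Int) × List (List Int) × List Int × List Int :=
  let l := s.toList
  let L := l.length
  let u := [(List.replicate L (0:Int)).set 0 1]   -- u = [0]*L; u[0] = 1 (IndexError when L = 0: outside Pre_)
  let v1 := List.replicate L (1:Int)
  -- the inner 'for j in range(i): if s == s_[j:j+L]: v2[i] = 0; break' sets v2[i] to 0
  -- iff some j matches (the break only stops early); s_[j:j+L] = (s_.drop j).take L (j ≥ 0, exact)
  let v2 := (List.range L).foldl (fun v2 i =>
      let s_ := l.take i ++ l.take (L - 1)        -- s[:i] + s[:-1]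
      if (List.range i).any (fun j => (s_.drop j).take L == l) then v2.set i 0 else v2)
    (List.replicate L (1:Int))
  let mx := (List.range L).foldl (fun mx i =>
      mx ++ [pvRowLoopA l i i [l.getD i ' '] ((List.replicate L (0:Int)).set 0 (-1))]) []
  let mx := (List.range (L - 1)).foldl (fun mx i => mx.set i ((mx.getD i []).set (i + 1) 1)) mx
  (mx, u, v1, v2)

-- ===== PORT B =====
-- B's z computation: 'k = 0; while j + k < L and s[k] == s[j+k]: k += 1' compares s with s[j:]
-- position by position, i.e. the length of the longest common prefix of l and l.drop j.
def pvZ : List Char → List Char → Nat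
  | a :: as, b :: bs => if a = b then pvZ as bs + 1 else 0
  | _, _ => 0

-- B's inner 'for k in range(i-1,-1,-1)' loop collecting marks (counter t+1 means k = t)
def pvMarksB (z : List Nat) (l : List Char) (i : Nat) : Nat → List Char → List Nat → List Nat
  | 0, _, marks => marks
  | t+1, seen, marks =>
    let k := t
    let c := l.getD k ' '
    if k ≤ z.getD (i - k) 0 ∧ c ∉ seen then    -- z[i-k] >= k and s[k] not in seen
      pvMarksB z l i t (seen ++ [c]) (marks ++ [k])
    else
      pvMarksB z l i t seen marks

def sep_str_mx_uv_def_alt (s : String) : List (List Int) × List (List Int) × List Int × List Int :=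
  let l := s.toList
  let L := l.length
  let z := (List.range L).map (fun j => pvZ l (l.drop j))
  let u := [(1:Int) :: List.replicate (L - 1) 0]            -- [1] + [0]*(L-1)
  let v1 := List.replicate L (1:Int)
  let ds := (List.range' 1 (L - 1)).filter (fun d => d + z.getD d 0 = L)  -- [d for d in range(1,L) if d+z[d]==L]
  let v2 := (List.range L).map (fun i =>
      if ds.any (fun d => decide (d ≤ i) && decide (d ≤ z.getD (i - d) 0)) then (0:Int) else 1)
  let mx := (List.range L).foldl (fun mx i =>
      let marks := pvMarksB z l i i [l.getD i ' '] []
      let r := (List.replicate L (0:Int)).set 0 (-1 - marks.length)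
      let r := marks.foldl (fun r k => r.set (k + 1) 1) r
      let r := if i + 1 < L then r.set (i + 1) 1 else r
      mx ++ [r]) []
  (mx, u, v1, v2)

-- ===== PRECONDITION & SPEC =====
-- A raises IndexError on the empty string (u[0] = 1 on an empty list); excluded.
def Pre_sep_str_mx_uv_def (s : String) : Prop := s ≠ ""
instance (s : String) : Decidable (Pre_sep_str_mx_uv_def s) := by unfold Pre_sep_str_mx_uv_def; infer_instance
def pvWitness_sep_str_mx_uv_def : String := "ab"


def Spec_sep_str_mx_uv_def (s : String) (out : List (List Int) × List (List Int) × List Int × List Int) : Prop := out = sep_str_mx_uv_def_alt s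
instance (s : String) (out : List (List Int) × List (List Int) × List Int × List Int) : Decidable (Spec_sep_str_mx_uv_def s out) := by unfold Spec_sep_str_mx_uv_def; infer_instance

-- ===== CLAIM (what is proved, stated in full; the proofs are below) =====
def Claim_equal_sep_str_mx_uv_def : Prop := ∀ (s : String), Dom_sep_str_mx_uv_def s → Pre_sep_str_mx_uv_def s → Spec_sep_str_mx_uv_def s (sep_str_mx_uv_def s)

-- ===== LEMMAS AND PROOFS =====

-- pvZ is the longest common prefix length: k ≤ pvZ a b iff the k-prefixes exist and agree.
theorem le_pvZ_iff (a b : List Char) (k : Nat) :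
    k ≤ pvZ a b ↔ k ≤ a.length ∧ k ≤ b.length ∧ a.take k = b.take k := by
  induction a generalizing b k with
  | nil =>
    cases k with
    | zero => simp [pvZ]
    | succ k => cases b <;> simp [pvZ]
  | cons x as ih =>
    cases b with
    | nil => cases k <;> simp [pvZ]
    | cons y bs =>
      cases k with
      | zero => simp
      | succ k =>
        simp only [pvZ]
        by_cases hxy : x = y
        · subst hxy
          rw [if_pos rfl]
          constructor
          · intro h
            have h' := (ih bs k).mp (by omega)
            refine ⟨by simpa using h'.1, by simpa using h'.2.1, by simp [h'.2.2]⟩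
          · rintro ⟨h1, h2, h3⟩
            simp only [List.take_succ_cons, List.cons.injEq, true_and] at h3
            have := (ih bs k).mpr ⟨by simpa using h1, by simpa using h2, h3⟩
            omega
        · rw [if_neg hxy]
          simp [hxy]

theorem pvZ_le_right (a b : List Char) : pvZ a b ≤ b.length :=
  ((le_pvZ_iff a b (pvZ a b)).mp le_rfl).2.1

-- condition of A's row loop ↔ condition of B's row loop
theorem condA_iff (l : List Char) (i k : Nat) (hk : k ≤ i) (hi : i ≤ l.length) :
    l.take k = (l.take i).drop (i - k) ↔ k ≤ pvZ l (l.drop (i - k)) := by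
  rw [List.drop_take, show i - (i - k) = k by omega, le_pvZ_iff]
  constructor
  · intro h
    refine ⟨by omega, ?_, h⟩
    rw [List.length_drop]; omega
  · exact fun h => h.2.2

-- getD on a map over range
theorem getD_map_range' {α : Type} (f : Nat → α) (n k : Nat) (d : α) (h : k < n) :
    ((List.range n).map f).getD k d = f k := by
  rw [List.getD_eq_getElem?_getD, List.getElem?_map, List.getElem?_range h]
  rfl

-- list set on a map over range
theorem set_map_range {α : Type} (f : Nat → α) (n k : Nat) (v : α) :
    ((List.range n).map f).set k v
      = (List.range n).map (fun i => if i = k then v else f i) := by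
  apply List.ext_getElem
  · simp
  · intro i h1 h2
    simp only [List.getElem_set, List.getElem_map, List.getElem_range]
    by_cases hik : k = i
    · simp [hik]
    · rw [if_neg hik, if_neg (fun h => hik h.symm)]

-- the condition of A's v2 inner loop, rewritten through pvZ (d := i - j)
theorem condV2_iff (l : List Char) (i j : Nat) (hj : j < i) (hi : i ≤ l.length) :
    ((l.take i ++ l.take (l.length - 1)).drop j).take l.length = l
      ↔ ((i - j) + pvZ l (l.drop (i - j)) = l.length ∧ (i - j) ≤ pvZ l (l.drop j)) := by
  have hlt : (l.take i).length = i := by simp; omega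
  rw [List.drop_append, hlt, Nat.sub_eq_zero_of_le hj.le, List.drop_zero, List.drop_take,
    List.take_append]
  have hfl : (List.take (i - j) (l.drop j)).length = i - j := by simp; omega
  rw [hfl, List.take_take, min_eq_right (by omega), List.take_take, min_eq_left (by omega)]
  constructor
  · intro h
    have h2 : List.take (i - j) (l.drop j) ++ List.take (l.length - (i - j)) l
        = l.take (i - j) ++ l.drop (i - j) := by
      rw [h, List.take_append_drop]
    obtain ⟨e1, e2⟩ := List.append_inj h2 (by simp; omega)
    constructor
    · have hle : l.length - (i - j) ≤ pvZ l (l.drop (i - j)) := by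
        refine (le_pvZ_iff _ _ _).mpr ⟨by omega, by simp, ?_⟩
        rw [e2, List.take_of_length_le (by simp)]
      have hge : pvZ l (l.drop (i - j)) ≤ l.length - (i - j) := by
        simpa using pvZ_le_right l (l.drop (i - j))
      omega
    · exact (le_pvZ_iff _ _ _).mpr ⟨by omega, by simp; omega, e1.symm⟩
  · rintro ⟨h1, h2⟩
    have e1 : List.take (i - j) (l.drop j) = l.take (i - j) :=
      ((le_pvZ_iff l (l.drop j) (i - j)).mp h2).2.2.symm
    have e2 : List.take (l.length - (i - j)) l = l.drop (i - j) := by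
      have h3 := ((le_pvZ_iff l (l.drop (i - j)) (l.length - (i - j))).mp (by omega)).2.2
      rw [h3, List.take_of_length_le (by simp)]
    rw [e1, e2, List.take_append_drop]

-- folding 'set i v when p i' over range k into a map over range L
theorem fold_set_range {α : Type} (g : Nat → α) (L : Nat) (p : Nat → Bool) (v : α) :
    ∀ k, k ≤ L →
      (List.range k).foldl (fun acc i => if p i then acc.set i v else acc) ((List.range L).map g)
        = (List.range L).map (fun i => if i < k ∧ p i = true then v else g i) := by
  intro k
  induction k with
  | zero =>
    intro _
    simp only [List.range_zero, List.foldl_nil]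
    apply List.map_congr_left
    intro i _
    simp
  | succ k ih =>
    intro hk
    rw [List.range_succ, List.foldl_append, ih (by omega), List.foldl_cons, List.foldl_nil]
    by_cases hp : p k = true
    · rw [if_pos hp, set_map_range]
      apply List.map_congr_left
      intro i hi
      by_cases hik : i = k
      · simp [hik, hp]
      · rw [if_neg hik]
        by_cases h2 : i < k ∧ p i = true
        · rw [if_pos h2, if_pos ⟨by omega, h2.2⟩]
        · rw [if_neg h2, if_neg (fun hcon => h2 ⟨by omega, hcon.2⟩)]
    · rw [if_neg hp]
      apply List.map_congr_left
      intro i hi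
      by_cases h2 : i < k ∧ p i = true
      · rw [if_pos h2, if_pos ⟨by omega, h2.2⟩]
      · rw [if_neg h2, if_neg ?_]
        rintro ⟨hc1, hc2⟩
        apply h2
        refine ⟨?_, hc2⟩
        rcases (by omega : i < k ∨ i = k) with h | h
        · exact h
        · exact absurd (h ▸ hc2) hp

-- A's v2-setting fold over range L equals a map
theorem v2_fold_eq_map (L : Nat) (p : Nat → Bool) :
    (List.range L).foldl (fun v2 i => if p i then v2.set i 0 else v2) (List.replicate L (1:Int))
      = (List.range L).map (fun i => if p i then (0:Int) else 1) := by
  have h0 : List.replicate L (1:Int) = (List.range L).map (fun _ => 1) := by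
    rw [List.map_const', List.length_range]
  rw [h0, fold_set_range (fun _ => (1:Int)) L p 0 L le_rfl]
  apply List.map_congr_left
  intro i hi
  simp only [List.mem_range] at hi
  by_cases hp : p i = true
  · rw [if_pos hp, if_pos ⟨hi, hp⟩]
  · rw [if_neg hp, if_neg (fun hc => hp hc.2)]

-- A's second mx pass (mx[i][i+1] = 1 for i in range(L-1)) over a mapped range
theorem fold_modify_range {α : Type} (g : Nat → α) (L : Nat) (h : Nat → α → α) (dflt : α) :
    ∀ k, k ≤ L →
      (List.range k).foldl (fun acc i => acc.set i (h i (acc.getD i dflt))) ((List.range L).map g)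
        = (List.range L).map (fun i => if i < k then h i (g i) else g i) := by
  intro k
  induction k with
  | zero =>
    intro _
    simp only [List.range_zero, List.foldl_nil]
    apply List.map_congr_left
    intro i _
    simp
  | succ k ih =>
    intro hk
    rw [List.range_succ, List.foldl_append, ih (by omega), List.foldl_cons, List.foldl_nil,
      getD_map_range' _ _ _ _ (by omega), if_neg (by omega), set_map_range]
    apply List.map_congr_left
    intro i hi
    by_cases hik : i = k
    · rw [if_pos hik, if_pos (by omega)]
      rw [hik]
    · rw [if_neg hik]
      by_cases h2 : i < k
      · rw [if_pos h2, if_pos (by omega)]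
      · rw [if_neg h2, if_neg (by omega)]

-- marks accumulator splits off
theorem pvMarksB_append (z : List Nat) (l : List Char) (i : Nat) :
    ∀ (t : Nat) (seen : List Char) (ms : List Nat),
      pvMarksB z l i t seen ms = ms ++ pvMarksB z l i t seen [] := by
  intro t
  induction t with
  | zero => intro seen ms; simp [pvMarksB]
  | succ t ih =>
    intro seen ms
    simp only [pvMarksB]
    split
    · rw [ih _ (ms ++ [t]), ih _ ([] ++ [t])]
      simp
    · exact ih _ ms

-- A's row loop equals folding A's update over the mark list
theorem rowLoopA_eq_foldl (l : List Char) (i : Nat) (hi : i < l.length) :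
    ∀ (t : Nat), t ≤ i → ∀ (used : List Char) (r : List Int),
      pvRowLoopA l i t used r
        = (pvMarksB ((List.range l.length).map (fun j => pvZ l (l.drop j))) l i t used []).foldl
            (fun r k => let r1 := r.set (k+1) 1; r1.set 0 (r1.getD 0 0 - 1)) r := by
  intro t
  induction t with
  | zero => intro _ used r; simp [pvRowLoopA, pvMarksB]
  | succ t ih =>
    intro ht used r
    have hcond : (l.take t = (l.take i).drop (i - t)) ↔
        (t ≤ ((List.range l.length).map (fun j => pvZ l (l.drop j))).getD (i - t) 0) := by
      rw [getD_map_range' _ _ _ _ (by omega)]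
      exact condA_iff l i t (by omega) (by omega)
    simp only [pvRowLoopA, pvMarksB, List.nil_append]
    by_cases hA : l.take t = (l.take i).drop (i - t) ∧ l.getD t ' ' ∉ used
    · rw [if_pos hA, if_pos ⟨hcond.mp hA.1, hA.2⟩, ih (by omega),
        pvMarksB_append _ _ _ t _ [t], List.foldl_append, List.foldl_cons, List.foldl_nil]
    · rw [if_neg hA, if_neg (fun hB => hA ⟨hcond.mpr hB.1, hB.2⟩), ih (by omega)]

-- folding A's update (set k+1, decrement slot 0) = set slot 0 up front, then only the set k+1's
theorem foldl_stepA_eq (ks : List Nat) :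
    ∀ (r : List Int) (a : Int), 0 < r.length →
      ks.foldl (fun r k => let r1 := r.set (k+1) 1; r1.set 0 (r1.getD 0 0 - 1)) (r.set 0 a)
        = ks.foldl (fun r k => r.set (k + 1) 1) (r.set 0 (a - ks.length)) := by
  induction ks with
  | nil => intro r a _; simp
  | cons k ks ih =>
    intro r a hr
    simp only [List.foldl_cons]
    have hget : (((r.set 0 a).set (k + 1) 1)).getD 0 0 = a := by
      rw [List.getD_eq_getElem?_getD, List.getElem?_set, if_neg (by omega),
        List.getElem?_set, if_pos rfl, if_pos (by simpa using hr)]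
      rfl
    rw [hget]
    have h2 : ((r.set 0 a).set (k + 1) 1).set 0 (a - 1)
        = (r.set (k + 1) 1).set 0 (a - 1) := by
      rw [List.set_comm _ _ (show (0:Nat) ≠ k + 1 by omega), List.set_set]
    rw [h2, ih (r.set (k + 1) 1) (a - 1) (by simpa using hr)]
    have h4 : a - 1 - (ks.length : Int) = a - ((k :: ks).length : Int) := by
      push_cast [List.length_cons]
      ring
    rw [h4, List.set_comm _ _ (show (k:Nat) + 1 ≠ 0 by omega)]

-- ===== VERDICT (by name: the statement is the Claim_ definition above) =====
theorem sep_str_mx_uv_def_spec : Claim_equal_sep_str_mx_uv_def := by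
  intro s _ hpre
  unfold Spec_sep_str_mx_uv_def sep_str_mx_uv_def sep_str_mx_uv_def_alt
  have hnil : s.toList ≠ [] := fun h => hpre (String.toList_eq_nil_iff.mp h)
  have hL : 0 < s.toList.length := List.length_pos_iff.mpr hnil
  set l := s.toList with hl
  simp only [Prod.mk.injEq]
  refine ⟨?_, ?_, ?_, ?_⟩
  · -- mx
    simp only [PySem.List.foldl_append_singleton_eq_map, List.nil_append]
    rw [fold_modify_range
      (fun i => pvRowLoopA l i i [l.getD i ' '] ((List.replicate l.length (0:Int)).set 0 (-1)))
      l.length (fun i r => r.set (i + 1) 1) [] (l.length - 1) (by omega)]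
    apply List.map_congr_left
    intro i hi
    simp only [List.mem_range] at hi
    rw [rowLoopA_eq_foldl l i hi i le_rfl,
      foldl_stepA_eq _ (List.replicate l.length 0) (-1) (by simpa using hL)]
    exact if_congr (by omega) rfl rfl
  · -- u
    obtain ⟨n, hn⟩ : ∃ n, l.length = n + 1 := ⟨l.length - 1, by omega⟩
    rw [hn, List.replicate_succ, List.set_cons_zero, Nat.add_sub_cancel]
  · -- v1
    trivial
  · -- v2
    rw [v2_fold_eq_map l.length (fun i => (List.range i).any (fun j =>
      List.take l.length (List.drop j (List.take i l ++ List.take (l.length - 1) l)) == l))]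
    apply List.map_congr_left
    intro i hi
    simp only [List.mem_range] at hi
    have hb : ((List.range i).any fun j =>
          List.take l.length (List.drop j (List.take i l ++ List.take (l.length - 1) l)) == l)
        = ((List.filter (fun d => decide
              (d + (List.map (fun j => pvZ l (List.drop j l)) (List.range l.length)).getD d 0
                = l.length)) (List.range' 1 (l.length - 1))).any
            (fun d => decide (d ≤ i) &&
              decide (d ≤ (List.map (fun j => pvZ l (List.drop j l)) (List.range l.length)).getD (i - d) 0))) := by
      rw [Bool.eq_iff_iff]
      simp only [List.any_eq_true, List.mem_range, List.mem_filter, List.mem_range'_1,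
        beq_iff_eq, Bool.and_eq_true, decide_eq_true_eq]
      constructor
      · rintro ⟨j, hj, hcond⟩
        have hc := (condV2_iff l i j hj (by omega)).mp hcond
        refine ⟨i - j, ⟨⟨by omega, by omega⟩, ?_⟩, by omega, ?_⟩
        · rw [getD_map_range' _ _ _ _ (by omega)]
          exact hc.1
        · rw [show i - (i - j) = j from by omega, getD_map_range' _ _ _ _ (by omega)]
          exact hc.2
      · rintro ⟨d, ⟨⟨hd1, hd2⟩, hdz⟩, hdi, hzid⟩
        refine ⟨i - d, by omega, ?_⟩
        apply (condV2_iff l i (i - d) (by omega) (by omega)).mpr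
        rw [show i - (i - d) = d from by omega]
        rw [getD_map_range' _ _ _ _ (by omega)] at hdz
        rw [getD_map_range' _ _ _ _ (by omega)] at hzid
        exact ⟨hdz, hzid⟩
    rw [hb]
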